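-- pv_equiv track=rewrite | github.com/myfunc/irun | apps/ivan/tools/build_source_bsp_assets.py | _tokenize_vmt
-- ===== SOURCE A (Python) =====
-- def _tokenize_vmt(text: str) -> list[str]:
--     # Minimal KeyValues tokenizer:
--     # - supports quoted strings
--     # - treats { and } as separate tokens
--     # - strips // comments
--     out: list[str] = []
--     for raw in text.splitlines():
--         line = raw.split("//", 1)[0].strip()
--         if not line:
--             continue
--         i = 0
--         while i < len(line):
--             c = line[i]
--             if c.isspace():
--                 i += 1
--                 continue
--             if c in "{}":
--                 out.append(c)
--                 i += 1
--                 continue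
--             if c == '"':
--                 i += 1
--                 j = i
--                 while j < len(line) and line[j] != '"':
--                     j += 1
--                 out.append(line[i:j])
--                 i = j + 1
--                 continue
--             j = i
--             while j < len(line) and (not line[j].isspace()) and line[j] not in "{}":
--                 j += 1
--             out.append(line[i:j])
--             i = j
--     return out
-- ===== SOURCE B (Python) =====
-- def _tokenize_vmt(text: str) -> list[str]:
--     # Per-character DFA with accumulator buffers instead of index-jump scanning:
--     # one pass per line, no indices, no inner while loops.
--     out: list[str] = []
--     for raw in text.splitlines():
--         line = raw.split("//", 1)[0].strip()
--         buf: list[str] = []     # chars of the bare token being built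
--         quote = None            # chars of the quoted token being built, or None
--         for ch in line:
--             if quote is not None:
--                 if ch == '"':
--                     out.append(''.join(quote))
--                     quote = None
--                 else:
--                     quote.append(ch)
--             elif ch == '"' and not buf:
--                 quote = []
--             elif ch in '{}':
--                 if buf:
--                     out.append(''.join(buf))
--                     buf = []
--                 out.append(ch)
--             elif ch.isspace():
--                 if buf:
--                     out.append(''.join(buf))
--                     buf = []
--             else:
--                 buf.append(ch)
--         if quote is not None:
--             out.append(''.join(quote))
--         elif buf:
--             out.append(''.join(buf))
--     return out
-- ===== Notes on version B (the rewrite author's own statement) =====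
-- stated objective: alternative
-- what changed: Replaces A's index-jump scanner (inner while-loops finding token ends plus slicing line[i:j]) with a single per-character DFA that carries accumulator buffers for the current bare/quoted token and flushes them at delimiters.
import Mathlib
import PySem

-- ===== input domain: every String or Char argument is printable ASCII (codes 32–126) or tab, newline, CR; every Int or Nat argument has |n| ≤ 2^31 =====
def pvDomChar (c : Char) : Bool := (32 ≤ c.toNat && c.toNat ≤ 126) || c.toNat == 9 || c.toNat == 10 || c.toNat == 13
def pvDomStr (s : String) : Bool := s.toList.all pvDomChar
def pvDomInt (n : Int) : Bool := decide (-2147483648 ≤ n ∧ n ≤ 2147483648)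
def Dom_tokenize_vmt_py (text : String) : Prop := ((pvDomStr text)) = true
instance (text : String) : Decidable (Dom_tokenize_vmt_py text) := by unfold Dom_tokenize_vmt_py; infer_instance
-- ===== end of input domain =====

-- B replaces A's index-jump scanner (inner while loops + slicing) with a per-character
-- DFA using accumulator buffers; same cost, alternative structure (objective: alternative).

-- ===== PORT A =====
-- A's inner scan 'j = i+1; while j < len(line) and line[j] != '"': j += 1' with the
-- slice line[i:j] and the skip i = j + 1: returns (scanned chars, rest after closing quote)
def pvSplitQuoteA : List Char → List Char × List Char
  | [] => ([], [])
  | c :: r =>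
    if c = '"' then ([], r)
    else
      let p := pvSplitQuoteA r
      (c :: p.1, p.2)

-- A's bare-token scan 'while j < len(line) and not ws and not {}' with slice line[i:j], i = j
def pvSplitBareA : List Char → List Char × List Char
  | [] => ([], [])
  | c :: r =>
    if PySem.Chars.isspace c || c = '{' || c = '}' then ([], c :: r)
    else
      let p := pvSplitBareA r
      (c :: p.1, p.2)

-- termination facts for the outer while-loop (the scans only move forward)
theorem pvSplitQuoteA_len (l : List Char) : (pvSplitQuoteA l).2.length ≤ l.length := by
  induction l with
  | nil => simp [pvSplitQuoteA]
  | cons c r ih =>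
    simp only [pvSplitQuoteA]
    split
    · simp
    · simpa using Nat.le_succ_of_le ih

theorem pvSplitBareA_len (l : List Char) : (pvSplitBareA l).2.length ≤ l.length := by
  induction l with
  | nil => simp [pvSplitBareA]
  | cons c r ih =>
    simp only [pvSplitBareA]
    split
    · simp
    · simpa using Nat.le_succ_of_le ih

-- A's 'while i < len(line)' loop, branch for branch
def pvTokLineA : List Char → List String
  | [] => []
  | c :: r =>
    if PySem.Chars.isspace c then pvTokLineA r
    else if c = '{' || c = '}' then String.ofList [c] :: pvTokLineA r
    else if c = '"' then
      let p := pvSplitQuoteA r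
      String.ofList p.1 :: pvTokLineA p.2
    else
      let p := pvSplitBareA r
      String.ofList (c :: p.1) :: pvTokLineA p.2
  termination_by l => l.length
  decreasing_by
  · simp
  · simp
  · exact Nat.lt_succ_of_le (pvSplitQuoteA_len r)
  · exact Nat.lt_succ_of_le (pvSplitBareA_len r)

def tokenize_vmt_py (text : String) : List String :=
  (PySem.Str.splitlines text).foldl
    (fun out raw =>
      let line := PySem.Chars.strip ((PySem.Chars.splitOnMax raw.toList ['/', '/'] 1).headD [])
      if line.isEmpty then out else out ++ pvTokLineA line)
    []

-- ===== PORT B =====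
-- B's 'for ch in line' DFA: state = (bare-token buffer buf, quoted buffer quote or none);
-- the trailing cases are the flush after the loop.
def pvDfaB : List Char → List Char → Option (List Char) → List String
  | [], _, some q => [String.ofList q]
  | [], buf, none => if buf.isEmpty then [] else [String.ofList buf]
  | ch :: rest, buf, some q =>
    if ch = '"' then String.ofList q :: pvDfaB rest buf none
    else pvDfaB rest buf (some (q ++ [ch]))
  | ch :: rest, buf, none =>
    if ch = '"' && buf.isEmpty then pvDfaB rest buf (some [])
    else if ch = '{' || ch = '}' then
      (if buf.isEmpty then [String.ofList [ch]] else [String.ofList buf, String.ofList [ch]])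
        ++ pvDfaB rest [] none
    else if PySem.Chars.isspace ch then
      (if buf.isEmpty then [] else [String.ofList buf]) ++ pvDfaB rest [] none
    else pvDfaB rest (buf ++ [ch]) none

def tokenize_vmt_py_alt (text : String) : List String :=
  (PySem.Str.splitlines text).flatMap
    (fun raw =>
      let line := PySem.Chars.strip ((PySem.Chars.splitOnMax raw.toList ['/', '/'] 1).headD [])
      pvDfaB line [] none)

-- ===== PRECONDITION & SPEC =====
def Spec_tokenize_vmt_py (text : String) (out : List String) : Prop := out = tokenize_vmt_py_alt text
instance (text : String) (out : List String) : Decidable (Spec_tokenize_vmt_py text out) := by unfold Spec_tokenize_vmt_py; infer_instance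

-- ===== CLAIM (what is proved, stated in full; the proofs are below) =====
def Claim_equal_tokenize_vmt_py : Prop := ∀ (text : String), Dom_tokenize_vmt_py text → Spec_tokenize_vmt_py text (tokenize_vmt_py text)

-- ===== LEMMAS AND PROOFS =====

theorem pvTokLineA_nil : pvTokLineA [] = [] := by rw [pvTokLineA]

-- in quote mode (the bare buffer is empty there) the DFA consumes exactly A's quote scan
theorem pvDfaB_quote (l : List Char) (q : List Char) :
    pvDfaB l [] (some q)
      = String.ofList (q ++ (pvSplitQuoteA l).1) :: pvDfaB (pvSplitQuoteA l).2 [] none := by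
  induction l generalizing q with
  | nil => simp [pvDfaB, pvSplitQuoteA]
  | cons c r ih =>
    by_cases hc : c = '"'
    · simp [pvDfaB, pvSplitQuoteA, hc]
    · simp [pvDfaB, pvSplitQuoteA, hc, ih]

-- main invariant: the DFA in normal mode equals A's scanner, a pending bare buffer
-- being exactly an unfinished bare-token scan
theorem pvDfaB_eq_tokA (n : Nat) :
    ∀ (l : List Char), l.length ≤ n → ∀ (buf : List Char),
      pvDfaB l buf none
        = if buf.isEmpty then pvTokLineA l
          else String.ofList (buf ++ (pvSplitBareA l).1) :: pvTokLineA (pvSplitBareA l).2 := by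
  induction n with
  | zero =>
    intro l hl buf
    have : l = [] := List.eq_nil_of_length_eq_zero (Nat.le_zero.mp hl)
    subst this
    cases buf <;> simp [pvDfaB, pvSplitBareA, pvTokLineA_nil]
  | succ n ih =>
    intro l hl buf
    cases l with
    | nil => cases buf <;> simp [pvDfaB, pvSplitBareA, pvTokLineA_nil]
    | cons c r =>
      have hr : r.length ≤ n := by simpa using Nat.succ_le_succ_iff.mp hl
      by_cases hq : c = '"'
      · subst hq
        have h0 : PySem.Chars.isspace '"' = false := by decide
        cases hbuf : buf.isEmpty with
        | true =>
          have hb : buf = [] := by simpa [List.isEmpty_iff] using hbuf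
          subst hb
          rw [pvTokLineA]
          simp only [pvDfaB]
          norm_num [h0]
          rw [pvDfaB_quote]
          simpa [h0] using ih _ (le_trans (pvSplitQuoteA_len r) hr) []
        | false =>
          rw [show pvSplitBareA ('"' :: r)
                = ('"' :: (pvSplitBareA r).1, (pvSplitBareA r).2) by
              rw [pvSplitBareA]; simp [h0]]
          simp only [pvDfaB, hbuf]
          norm_num [h0]
          rw [ih r hr (buf ++ ['"'])]
          simp [List.isEmpty_iff]
      · by_cases hbr : c = '{' ∨ c = '}'
        · have hsp : PySem.Chars.isspace c = false := by
            rcases hbr with h | h <;> (subst h; decide)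
          have hq' : (decide (c = '"')) = false := by simp [hq]
          have hbrb : (decide (c = '{') || decide (c = '}')) = true := by
            rcases hbr with h | h <;> simp [h]
          cases hbuf : buf.isEmpty with
          | true =>
            have hb : buf = [] := by simpa [List.isEmpty_iff] using hbuf
            subst hb
            rw [pvTokLineA]
            simp only [pvDfaB, hq', hsp, hbrb]
            simpa using ih r hr []
          | false =>
            rw [show pvSplitBareA (c :: r) = ([], c :: r) by
                  rw [pvSplitBareA]; simp [hsp, hbrb]]
            conv_rhs => rw [pvTokLineA]
            simp only [pvDfaB, hq', hsp, hbrb, hbuf]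
            simp [ih r hr []]
        · have hbrb : (decide (c = '{') || decide (c = '}')) = false := by
            simp only [Bool.or_eq_false_iff, decide_eq_false_iff_not]
            exact ⟨fun h => hbr (Or.inl h), fun h => hbr (Or.inr h)⟩
          have hq' : (decide (c = '"')) = false := by simp [hq]
          by_cases hsp : PySem.Chars.isspace c = true
          · cases hbuf : buf.isEmpty with
            | true =>
              have hb : buf = [] := by simpa [List.isEmpty_iff] using hbuf
              subst hb
              rw [pvTokLineA]
              simp only [pvDfaB, hq', hsp, hbrb]
              simpa [hsp] using ih r hr []
            | false =>
              rw [show pvSplitBareA (c :: r) = ([], c :: r) by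
                    rw [pvSplitBareA]; simp [hsp]]
              conv_rhs => rw [pvTokLineA]
              simp only [pvDfaB, hq', hsp, hbrb, hbuf]
              simp [ih r hr []]
          · -- bare character
            have hsp' : PySem.Chars.isspace c = false := by simpa using hsp
            have hsb : pvSplitBareA (c :: r) = (c :: (pvSplitBareA r).1, (pvSplitBareA r).2) := by
              rw [pvSplitBareA]; simp [hsp', hbrb]
            cases hbuf : buf.isEmpty with
            | true =>
              have hb : buf = [] := by simpa [List.isEmpty_iff] using hbuf
              subst hb
              rw [pvTokLineA]
              simp only [pvDfaB, hq', hsp', hbrb, Bool.false_and, List.nil_append,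
                Bool.false_eq_true, if_false]
              rw [ih r hr [c]]
              simp [hq]
            | false =>
              rw [hsb]
              simp only [pvDfaB, hq', hsp', hbrb, hbuf]
              rw [ih r hr (buf ++ [c])]
              simp [List.isEmpty_iff]

theorem pvDfaB_line (l : List Char) : pvDfaB l [] none = pvTokLineA l := by
  simpa using pvDfaB_eq_tokA l.length l (le_refl _) []

theorem pvFold_eq_flatMap (ls : List String) (init : List String) :
    ls.foldl
      (fun out raw =>
        let line := PySem.Chars.strip ((PySem.Chars.splitOnMax raw.toList ['/', '/'] 1).headD [])
        if line.isEmpty then out else out ++ pvTokLineA line)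
      init
    = init ++ ls.flatMap
        (fun raw =>
          let line := PySem.Chars.strip ((PySem.Chars.splitOnMax raw.toList ['/', '/'] 1).headD [])
          pvDfaB line [] none) := by
  induction ls generalizing init with
  | nil => simp
  | cons raw ls ih =>
    simp only [List.foldl_cons, List.flatMap_cons, ih]
    rw [pvDfaB_line]
    by_cases hl : (PySem.Chars.strip ((PySem.Chars.splitOnMax raw.toList ['/', '/'] 1).headD [])).isEmpty
    · rw [List.isEmpty_iff] at hl
      simp only [List.headD] at hl ⊢
      simp [hl, pvTokLineA_nil]
    · have hne : PySem.Chars.strip ((PySem.Chars.splitOnMax raw.toList ['/', '/'] 1).headD []) ≠ [] := by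
        simpa [List.isEmpty_iff] using hl
      simp only [List.headD] at hne ⊢
      simp [hne, pvDfaB_line]

-- ===== VERDICT (by name: the statement is the Claim_ definition above) =====
theorem tokenize_vmt_py_spec : Claim_equal_tokenize_vmt_py := by
  intro text _
  unfold Spec_tokenize_vmt_py tokenize_vmt_py tokenize_vmt_py_alt
  rw [pvFold_eq_flatMap]
  simp
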